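-- pv_equiv track=rewrite | github.com/jamiejamiebobamie/spd24_techInterviewQuestions | problems_spd2.py | find_closest_handles
-- ===== SOURCE A (Python) =====
-- def find_closest_handles(user_handle, handles_array, k):
--     """Finds the closest handles (k) to the user's handle."""
--
--     result = []
--
--     if k > len(handles_array):
--         return handles_array
--
--     user_handle_chars = set()
--     for char in user_handle:
--         user_handle_chars.add(char)
--
--     handle_scores_dict = {}
--     for handle in handles_array:
--         score = 0
--         for char in handle:
--             if char in user_handle_chars:
--                 score += 1
--             else:
--                 score -= 1
--
--         if score not in handle_scores_dict:
--             handle_scores_dict[score] = [handle]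
--         else:
--             handle_scores_dict[score].append(handle)
--
--     while len(result) < k:
--         max_key = max(handle_scores_dict.keys())
--         max_key_handles = handle_scores_dict[max_key]
--         i = 0;
--         while len(result) < k and i < len(max_key_handles):
--             handle = max_key_handles[i]
--             result.append(handle)
--             i += 1
--         del handle_scores_dict[max_key]
--     return result
-- ===== SOURCE B (Python) =====
-- def find_closest_handles(user_handle, handles_array, k):
--     """Finds the closest handles (k) to the user's handle."""
--     if k > len(handles_array):
--         return handles_array
--     chars = set(user_handle)
--     scored = [(sum(1 if c in chars else -1 for c in h), h) for h in handles_array]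
--     scored.sort(key=lambda p: -p[0])
--     return [h for _, h in scored[:max(k, 0)]]
-- ===== Notes on version B (the rewrite author's own statement) =====
-- stated objective: simpler
-- what changed: Replaces the score-bucket dict and the repeated max-key extraction loop with a flat list of (score, handle) pairs sorted once by descending score (stable, so ties keep insertion order) and sliced to max(k,0).
import Mathlib
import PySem

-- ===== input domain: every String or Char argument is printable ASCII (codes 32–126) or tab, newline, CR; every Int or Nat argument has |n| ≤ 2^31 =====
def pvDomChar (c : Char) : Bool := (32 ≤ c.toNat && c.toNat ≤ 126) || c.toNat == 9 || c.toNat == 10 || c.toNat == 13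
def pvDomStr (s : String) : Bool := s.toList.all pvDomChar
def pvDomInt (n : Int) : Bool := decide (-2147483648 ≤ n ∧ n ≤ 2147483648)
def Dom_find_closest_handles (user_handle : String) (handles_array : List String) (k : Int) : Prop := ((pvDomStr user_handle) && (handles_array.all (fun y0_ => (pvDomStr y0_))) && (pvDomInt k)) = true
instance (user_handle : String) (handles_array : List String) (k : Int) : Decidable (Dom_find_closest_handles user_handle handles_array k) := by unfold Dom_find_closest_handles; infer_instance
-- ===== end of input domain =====

-- B replaces A's score-bucket dict and repeated max-key extraction by one stable sort of
-- (score, handle) pairs on descending score, sliced to max(k,0); objective: simpler.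

-- ===== PORT A =====

-- helper for pvLoopA's termination: deleting a present key shrinks the filtered list
theorem pvFilterLtOfMem {α : Type} (l : List α) (p : α → Bool) (x : α)
    (h : x ∈ l) (hp : p x = false) : (l.filter p).length < l.length := by
  induction l with
  | nil => cases h
  | cons a t ih =>
    rcases List.mem_cons.mp h with rfl | hm
    · have := List.length_filter_le p t
      simp [List.filter, hp]; omega
    · by_cases hpa : p a
      · simpa [List.filter_cons, hpa] using Nat.succ_lt_succ (ih hm)
      · have := List.length_filter_le p t
        simp only [Bool.not_eq_true] at hpa
        simp [List.filter_cons, hpa]; omega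

-- score of one handle: A's running-total loop over the handle's characters
def pvScoreA (uset : PySem.Set Char) (handle : String) : Int :=
  handle.toList.foldl
    (fun score c => if PySem.Set.contains uset c then score + 1 else score - 1) 0

-- inner while loop: 'while len(result) < k and i < len(max_key_handles)'
def pvInnerA (k : Int) (bucket : List String) (result : List String) (i : Int) : List String :=
  if (result.length : Int) < k ∧ i < (bucket.length : Int) then
    pvInnerA k bucket (result ++ [PySem.List.pyGetD bucket i ""]) (i + 1)
  else result
termination_by ((bucket.length : Int) - i).toNat
decreasing_by omega

-- outer while loop: 'while len(result) < k'; the none branch is where Python's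
-- max() of an empty dict would raise ValueError (unreachable when k ≤ len(handles_array))
def pvLoopA (k : Int) (result : List String) (d : PySem.Dict Int (List String)) : List String :=
  if (result.length : Int) < k then
    match hm : PySem.List.max? d.keys (fun x => x) with
    | none => result
    | some m =>
        pvLoopA k (pvInnerA k (PySem.Dict.getD d m []) result 0) (PySem.Dict.erase d m)
  else result
termination_by d.items.length
decreasing_by
  have hmem : m ∈ d.keys := PySem.List.max?_mem hm
  obtain ⟨p, hp, hp1⟩ := List.mem_map.mp hmem
  exact pvFilterLtOfMem d.items (fun q => !(q.1 == m)) p hp (by simp [hp1])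

def find_closest_handles (user_handle : String) (handles_array : List String) (k : Int) : List String :=
  if k > (handles_array.length : Int) then handles_array
  else
    let user_handle_chars := user_handle.toList.foldl PySem.Set.add PySem.Set.empty
    let d := handles_array.foldl
      (fun d handle =>
        let score := pvScoreA user_handle_chars handle
        if ¬ PySem.Dict.contains d score then PySem.Dict.insert d score [handle]
        else PySem.Dict.modify d score [] (fun l => l ++ [handle]))
      PySem.Dict.empty
    pvLoopA k [] d

-- ===== PORT B =====

-- score of one handle: sum of ±1 over its characters
def pvScoreB (chars : PySem.Set Char) (h : String) : Int :=
  (h.toList.map (fun c => if PySem.Set.contains chars c then (1 : Int) else -1)).sum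

def find_closest_handles_alt (user_handle : String) (handles_array : List String) (k : Int) : List String :=
  if k > (handles_array.length : Int) then handles_array
  else
    let chars := PySem.Set.ofList user_handle.toList
    let scored := handles_array.map (fun h => (pvScoreB chars h, h))
    let sortedP := PySem.List.sorted scored (fun p => -p.1) false
    PySem.List.slice (sortedP.map (fun p => p.2)) none (some (max k 0))

-- ===== PRECONDITION & SPEC =====
def Spec_find_closest_handles (user_handle : String) (handles_array : List String) (k : Int) (out : List String) : Prop := out = find_closest_handles_alt user_handle handles_array k
instance (user_handle : String) (handles_array : List String) (k : Int) (out : List String) : Decidable (Spec_find_closest_handles user_handle handles_array k out) := by unfold Spec_find_closest_handles; infer_instance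

-- ===== CLAIM (what is proved, stated in full; the proofs are below) =====
def Claim_equal_find_closest_handles : Prop := ∀ (user_handle : String) (handles_array : List String) (k : Int), Dom_find_closest_handles user_handle handles_array k → Spec_find_closest_handles user_handle handles_array k (find_closest_handles user_handle handles_array k)

-- ===== LEMMAS AND PROOFS =====

-- buckets kept as an association list sorted strictly descending by score
def pvAddB : List (Int × List String) → Int → String → List (Int × List String)
  | [], s, h => [(s, [h])]
  | (t, l) :: rest, s, h =>
    if t < s then (s, [h]) :: (t, l) :: rest
    else if s = t then (t, l ++ [h]) :: rest
    else (t, l) :: pvAddB rest s h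

def pvG (bs : List (Int × List String)) : List (Int × String) :=
  bs.flatMap (fun p => p.2.map (fun h => (p.1, h)))

def pvFlat (bs : List (Int × List String)) : List String := bs.flatMap (fun p => p.2)

def pvDesc (bs : List (Int × List String)) : Prop := bs.Pairwise (fun a b => b.1 < a.1)

theorem pvScore_eq (u : PySem.Set Char) (h : String) : pvScoreA u h = pvScoreB u h := by
  unfold pvScoreA pvScoreB
  have key : ∀ (l : List Char) (a : Int),
      l.foldl (fun score c => if PySem.Set.contains u c then score + 1 else score - 1) a
        = a + (l.map (fun c => if PySem.Set.contains u c then (1 : Int) else -1)).sum := by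
    intro l
    induction l with
    | nil => intro a; simp
    | cons c t ih =>
      intro a
      rw [List.foldl_cons, ih, List.map_cons, List.sum_cons]
      split <;> ring
  simpa using key h.toList 0

theorem pvAddB_fst_sub (bs : List (Int × List String)) (s : Int) (h : String) :
    ∀ p ∈ pvAddB bs s h, p.1 = s ∨ p.1 ∈ bs.map Prod.fst := by
  induction bs with
  | nil => intro p hp; simp [pvAddB] at hp; simp [hp]
  | cons q rest ih =>
    obtain ⟨t, l⟩ := q
    intro p hp
    by_cases h1 : t < s
    · simp only [pvAddB, if_pos h1] at hp
      rcases List.mem_cons.mp hp with rfl | hp'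
      · left; rfl
      · right; exact List.mem_map.mpr ⟨p, hp', rfl⟩
    · by_cases h2 : s = t
      · simp only [pvAddB, if_neg h1, if_pos h2] at hp
        rcases List.mem_cons.mp hp with rfl | hp'
        · right; simp
        · right; simp only [List.map_cons]; exact List.mem_cons_of_mem _ (List.mem_map.mpr ⟨p, hp', rfl⟩)
      · simp only [pvAddB, if_neg h1, if_neg h2] at hp
        rcases List.mem_cons.mp hp with rfl | hp'
        · right; simp
        · rcases ih p hp' with h | h
          · left; exact h
          · right; simp only [List.map_cons]; exact List.mem_cons_of_mem _ h

theorem pvAddB_desc (bs : List (Int × List String)) (s : Int) (h : String)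
    (hd : pvDesc bs) : pvDesc (pvAddB bs s h) := by
  induction bs with
  | nil => simp [pvAddB, pvDesc]
  | cons q rest ih =>
    obtain ⟨t, l⟩ := q
    simp only [pvDesc] at *
    rw [List.pairwise_cons] at hd
    obtain ⟨hlt, hrest⟩ := hd
    by_cases h1 : t < s
    · simp only [pvAddB, if_pos h1]
      refine List.Pairwise.cons ?_ (List.Pairwise.cons hlt hrest)
      intro q hq
      rcases List.mem_cons.mp hq with rfl | hq'
      · exact h1
      · exact lt_trans (hlt q hq') h1
    · by_cases h2 : s = t
      · simp only [pvAddB, if_neg h1, if_pos h2]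
        exact List.Pairwise.cons hlt hrest
      · simp only [pvAddB, if_neg h1, if_neg h2]
        refine List.Pairwise.cons ?_ (ih hrest)
        intro q hq
        rcases pvAddB_fst_sub rest s h q hq with he | hm
        · rw [he]; omega
        · obtain ⟨p, hp, hp1⟩ := List.mem_map.mp hm
          rw [← hp1]; exact hlt p hp

theorem pvAddB_perm_of_not_mem (bs : List (Int × List String)) (s : Int) (h : String)
    (hs : s ∉ bs.map Prod.fst) : (pvAddB bs s h).Perm (bs ++ [(s, [h])]) := by
  induction bs with
  | nil => simp [pvAddB]
  | cons q rest ih =>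
    obtain ⟨t, l⟩ := q
    simp only [List.map_cons, List.mem_cons] at hs
    push_neg at hs
    by_cases h1 : t < s
    · simp only [pvAddB, if_pos h1]
      exact (List.perm_append_singleton _ _).symm
    · rw [pvAddB, if_neg h1, if_neg hs.1]
      exact List.Perm.cons _ (ih hs.2)

theorem pvAddB_eq_map (bs : List (Int × List String)) (s : Int) (h : String) (l : List String)
    (hd : pvDesc bs) (hm : (s, l) ∈ bs) :
    pvAddB bs s h = bs.map (fun p => if p.1 == s then (s, l ++ [h]) else p) := by
  induction bs with
  | nil => cases hm
  | cons q rest ih =>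
    obtain ⟨t, lt'⟩ := q
    simp only [pvDesc] at *
    rw [List.pairwise_cons] at hd
    obtain ⟨hlt, hrest⟩ := hd
    by_cases h1 : t < s
    · exfalso
      rcases List.mem_cons.mp hm with he | hm'
      · exact absurd (congrArg Prod.fst he).symm (by simp; omega)
      · have := hlt _ hm'; simp at this; omega
    · by_cases h2 : s = t
      · rcases List.mem_cons.mp hm with he | hm'
        · have hl : lt' = l := (Prod.mk.injEq _ _ _ _ ▸ he.symm).2
          subst h2
          simp only [pvAddB, if_neg h1, if_pos rfl, List.map_cons, beq_self_eq_true, if_pos trivial, hl]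
          congr 1
          have : ∀ p ∈ rest, (fun p => if p.1 == s then (s, l ++ [h]) else p) p = p := by
            intro p hp
            have := hlt p hp
            simp only [ite_eq_right_iff]
            intro hb; exfalso; rw [beq_iff_eq] at hb; omega
          rw [List.map_congr_left this]; simp
        · exfalso
          have := hlt _ hm'
          simp at this; omega
      · rw [pvAddB, if_neg h1, if_neg h2, List.map_cons]
        have hm' : (s, l) ∈ rest := by
          rcases List.mem_cons.mp hm with he | hm'
          · exact absurd (congrArg Prod.fst he) (by simp [h2])
          · exact hm'
        rw [ih hrest hm']
        have : (t == s) = false := by simp; omega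
        simp [this]

theorem pvFind_eq {items : List (Int × List String)} {m : Int} {l : List String}
    (hnd : (items.map Prod.fst).Nodup) (hm : (m, l) ∈ items) :
    items.find? (fun p => p.1 == m) = some (m, l) := by
  induction items with
  | nil => cases hm
  | cons q rest ih =>
    obtain ⟨t, lt'⟩ := q
    simp only [List.map_cons, List.nodup_cons] at hnd
    by_cases ht : t = m
    · subst ht
      have : lt' = l := by
        rcases List.mem_cons.mp hm with he | hm'
        · exact ((Prod.mk.injEq _ _ _ _).mp he.symm).2
        · exact absurd (List.mem_map.mpr ⟨_, hm', rfl⟩) hnd.1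
      rw [this, List.find?_cons_of_pos (by simp)]
    · rw [List.find?_cons_of_neg (by simp [ht])]
      refine ih hnd.2 ?_
      rcases List.mem_cons.mp hm with he | hm'
      · exact absurd ((Prod.mk.injEq _ _ _ _).mp he.symm).1 ht
      · exact hm' 

theorem pvDesc_nodup_keys {bs : List (Int × List String)} (hd : pvDesc bs) :
    (bs.map Prod.fst).Nodup := by
  have hp : bs.Pairwise (fun a b => a.1 ≠ b.1) := hd.imp (fun hab => by omega)
  exact List.pairwise_map.mpr hp

theorem pvG_cons (t : Int) (l : List String) (rest : List (Int × List String)) :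
    pvG ((t, l) :: rest) = l.map (fun h => (t, h)) ++ pvG rest := by
  simp [pvG]

theorem pvStep_perm (d : PySem.Dict Int (List String)) (bs : List (Int × List String))
    (s : Int) (h : String) (hp : d.items.Perm bs) (hd : pvDesc bs) :
    (if ¬ PySem.Dict.contains d s then PySem.Dict.insert d s [h]
     else PySem.Dict.modify d s [] (fun l => l ++ [h])).items.Perm (pvAddB bs s h) := by
  by_cases hc : PySem.Dict.contains d s = true
  · rw [if_neg (by simp [hc])]
    have hmemk : s ∈ bs.map Prod.fst := by
      obtain ⟨p, hpm, hps⟩ := List.any_eq_true.mp hc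
      rw [beq_iff_eq] at hps
      exact List.mem_map.mpr ⟨p, hp.subset hpm, hps⟩
    obtain ⟨⟨s', l⟩, hsl, hs1⟩ := List.mem_map.mp hmemk
    simp only at hs1
    subst hs1
    have hnd_items : (d.items.map Prod.fst).Nodup :=
      ((hp.map Prod.fst).nodup_iff).mpr (pvDesc_nodup_keys hd)
    have hfind : d.items.find? (fun p => p.1 == s') = some (s', l) :=
      pvFind_eq hnd_items (hp.mem_iff.mpr hsl)
    have hgetD : PySem.Dict.getD d s' [] = l := by
      simp [PySem.Dict.getD, PySem.Dict.get?, hfind]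
    rw [PySem.Dict.modify, hgetD]
    have hins : (PySem.Dict.insert d s' (l ++ [h])).items
        = d.items.map (fun p => if p.1 == s' then (s', l ++ [h]) else p) := by
      simp [PySem.Dict.insert, hc]
    rw [hins, pvAddB_eq_map bs s' h l hd hsl]
    exact hp.map _
  · rw [if_pos (by simp [hc])]
    have hnot : s ∉ bs.map Prod.fst := by
      intro hmem
      obtain ⟨p, hpm, hp1⟩ := List.mem_map.mp hmem
      exact hc (List.any_eq_true.mpr ⟨p, hp.mem_iff.mpr hpm, by simp [hp1]⟩)
    have hcf : PySem.Dict.contains d s = false := by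
      cases hb : PySem.Dict.contains d s
      · rfl
      · exact absurd hb hc
    have hins : (PySem.Dict.insert d s [h]).items = d.items ++ [(s, [h])] := by
      simp [PySem.Dict.insert, hcf]
    rw [hins]
    exact (hp.append_right _).trans (pvAddB_perm_of_not_mem bs s h hnot).symm

theorem pvInsertBy_skip {α : Type} (before : α → α → Bool) (x : α) (ys zs : List α)
    (h : ∀ y ∈ ys, before x y = false) :
    PySem.List.insertBy before x (ys ++ zs) = ys ++ PySem.List.insertBy before x zs := by
  induction ys with
  | nil => simp
  | cons y t ih =>
    rw [List.cons_append, PySem.List.insertBy, h y List.mem_cons_self]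
    simp only [Bool.false_eq_true, if_false, List.cons_append]
    rw [ih (fun z hz => h z (List.mem_cons_of_mem _ hz))]

theorem pvInsertBy_front {α : Type} (before : α → α → Bool) (x : α) (ys : List α)
    (h : ∀ y ∈ ys, before x y = true) :
    PySem.List.insertBy before x ys = x :: ys := by
  cases ys with
  | nil => rfl
  | cons y t => rw [PySem.List.insertBy, h y List.mem_cons_self]; simp

theorem pvG_fst_mem (bs : List (Int × List String)) (q : Int × String) (h : q ∈ pvG bs) :
    q.1 ∈ bs.map Prod.fst := by
  simp only [pvG, List.mem_flatMap, List.mem_map] at h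
  obtain ⟨p, hp, a, _, ha⟩ := h
  exact List.mem_map.mpr ⟨p, hp, by rw [← ha]⟩

theorem pvInsertBy_G (bs : List (Int × List String)) (s : Int) (h : String)
    (hd : pvDesc bs) :
    PySem.List.insertBy (fun a b => decide ((-(a.1) : Int) < -(b.1))) (s, h) (pvG bs)
      = pvG (pvAddB bs s h) := by
  induction bs with
  | nil => simp [pvG, pvAddB, PySem.List.insertBy]
  | cons q rest ih =>
    obtain ⟨t, l⟩ := q
    simp only [pvDesc] at *
    rw [List.pairwise_cons] at hd
    obtain ⟨hlt, hrest⟩ := hd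
    have hkeys : ∀ y ∈ pvG ((t, l) :: rest), y.1 ≤ t := by
      intro y hy
      have hmm := pvG_fst_mem _ y hy
      rw [List.map_cons] at hmm
      rcases List.mem_cons.mp hmm with he | hm
      · simp only at he; omega
      · obtain ⟨p, hpm, hp1⟩ := List.mem_map.mp hm
        have := hlt p hpm; omega
    have hrestkeys : ∀ y ∈ pvG rest, y.1 < t := by
      intro y hy
      obtain ⟨p, hpm, hp1⟩ := List.mem_map.mp (pvG_fst_mem _ y hy)
      have := hlt p hpm; omega
    by_cases h1 : t < s
    · rw [pvInsertBy_front _ _ _ (fun y hy => by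
        have := hkeys y hy; simp; omega)]
      simp only [pvAddB, if_pos h1, pvG_cons]
      simp
    · by_cases h2 : s = t
      · subst h2
        rw [pvG_cons, pvInsertBy_skip _ _ _ _ (fun y hy => by
          obtain ⟨a, _, ha⟩ := List.mem_map.mp hy
          simp [← ha])]
        rw [pvInsertBy_front _ _ _ (fun y hy => by
          have := hrestkeys y hy; simp; omega)]
        have haddb : pvAddB ((s, l) :: rest) s h = (s, l ++ [h]) :: rest := by
          simp [pvAddB]
        rw [haddb, pvG_cons]
        simp
      · rw [pvG_cons, pvInsertBy_skip _ _ _ _ (fun y hy => by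
          obtain ⟨a, _, ha⟩ := List.mem_map.mp hy
          simp [← ha]; omega)]
        rw [ih hrest]
        simp only [pvAddB, if_neg h1, if_neg h2, pvG_cons]

theorem pvInnerA_eq (k : Int) (bucket : List String) :
    ∀ (i : Int) (result : List String), 0 ≤ i →
    pvInnerA k bucket result i
      = result ++ (bucket.drop i.toNat).take ((k - result.length).toNat) := by
  have key : ∀ (n : Nat) (i : Int) (result : List String), 0 ≤ i → bucket.length ≤ i.toNat + n →
      pvInnerA k bucket result i
        = result ++ (bucket.drop i.toNat).take ((k - result.length).toNat) := by
    intro n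
    induction n with
    | zero =>
      intro i result h0 hn
      rw [pvInnerA, if_neg (fun hh => absurd hh.2 (by omega)), List.drop_eq_nil_of_le (by omega)]
      simp
    | succ n ih =>
      intro i result h0 hn
      rw [pvInnerA]
      by_cases hc : (result.length : Int) < k ∧ i < (bucket.length : Int)
      · rw [if_pos hc]
        obtain ⟨h1, h2⟩ := hc
        rw [ih (i + 1) _ (by omega) (by omega)]
        have hlt : i.toNat < bucket.length := by omega
        rw [PySem.List.pyGetD_eq_getElem bucket "" h0 h2]
        have hdrop : bucket.drop i.toNat = bucket[i.toNat] :: bucket.drop (i.toNat + 1) :=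
          List.drop_eq_getElem_cons hlt
        have hiN : (i + 1).toNat = i.toNat + 1 := by omega
        rw [hiN, hdrop]
        simp only [List.length_append, List.length_cons, List.length_nil]
        push_cast
        have hsucc : (k - (result.length : Int)).toNat
            = (k - ((result.length : Int) + 1)).toNat + 1 := by omega
        rw [hsucc, List.take_succ_cons, List.append_assoc, List.singleton_append]
      · rw [if_neg hc]
        rcases not_and_or.mp hc with h | h
        · have h0' : (k - result.length).toNat = 0 := by omega
          simp [h0']
        · rw [List.drop_eq_nil_of_le (by omega)]
          simp
  intro i result h0
  exact key bucket.length i result h0 (by omega)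

theorem pvLoopA_eq (k : Int) :
    ∀ (bs : List (Int × List String)) (d : PySem.Dict Int (List String)) (result : List String),
    d.items.Perm bs → pvDesc bs →
    pvLoopA k result d = result ++ (pvFlat bs).take ((k - result.length).toNat) := by
  intro bs
  induction bs with
  | nil =>
    intro d result hp hd
    have hitems : d.items = [] := hp.eq_nil
    have hkeys : d.keys = [] := by simp [PySem.Dict.keys, hitems]
    rw [pvLoopA]
    by_cases hk : (result.length : Int) < k
    · rw [if_pos hk]
      have hrhs : result ++ (pvFlat ([] : List (Int × List String))).take ((k - result.length).toNat)
          = result := by simp [pvFlat]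
      rw [hrhs]
      split
      next => rfl
      next m heq =>
        rw [hkeys] at heq
        simp [PySem.List.max?] at heq
    · rw [if_neg hk]
      have h0 : (k - result.length).toNat = 0 := by omega
      simp [pvFlat, h0]
  | cons q rest ih =>
    obtain ⟨m, l⟩ := q
    intro d result hp hd
    have hdfull := hd
    simp only [pvDesc] at hd
    rw [List.pairwise_cons] at hd
    obtain ⟨hlt, hrest⟩ := hd
    rw [pvLoopA]
    by_cases hk : (result.length : Int) < k
    · rw [if_pos hk]
      have hkeysperm : d.keys.Perm (m :: rest.map Prod.fst) := by
        simpa [PySem.Dict.keys] using hp.map Prod.fst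
      have hmax : PySem.List.max? d.keys (fun x => x) = some m := by
        cases hmx : PySem.List.max? d.keys (fun x => x) with
        | none =>
          rw [PySem.List.max?_eq_none_iff] at hmx
          rw [hmx] at hkeysperm
          exact absurd hkeysperm.symm.eq_nil (List.cons_ne_nil _ _)
        | some x =>
          have hxmem : x ∈ d.keys := PySem.List.max?_mem hmx
          have hmmem : m ∈ d.keys := hkeysperm.mem_iff.mpr List.mem_cons_self
          have hmax' := PySem.List.max?_isMax hmx
          have h2 : m ≤ x := hmax' m hmmem
          rcases List.mem_cons.mp (hkeysperm.subset hxmem) with he | hm'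
          · rw [he]
          · obtain ⟨p, hpm, hp1⟩ := List.mem_map.mp hm'
            have h1 : x < m := hp1 ▸ hlt p hpm
            omega
      split
      next heq =>
        have hcontra : (some m : Option Int) = none := hmax.symm.trans heq
        cases hcontra
      next m' heq =>
        have hsome : (some m : Option Int) = some m' := hmax.symm.trans heq
        have hme : m' = m := by injection hsome with he; exact he.symm
        rw [hme]
        have hnd_items : (d.items.map Prod.fst).Nodup :=
          ((hp.map Prod.fst).nodup_iff).mpr (pvDesc_nodup_keys hdfull)
        have hfind : d.items.find? (fun p => p.1 == m) = some (m, l) :=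
          pvFind_eq hnd_items (hp.mem_iff.mpr List.mem_cons_self)
        have hgetD : PySem.Dict.getD d m [] = l := by
          simp [PySem.Dict.getD, PySem.Dict.get?, hfind]
        rw [hgetD, pvInnerA_eq k l 0 result le_rfl]
        have herase : (PySem.Dict.erase d m).items.Perm rest := by
          have hfil := hp.filter (fun q => !(q.1 == m))
          have hfe : ((m, l) :: rest).filter (fun q => !(q.1 == m)) = rest := by
            rw [List.filter_cons]
            simp only [beq_self_eq_true, Bool.not_true, Bool.false_eq_true, if_false]
            exact List.filter_eq_self.mpr (fun p hpm => by
              have := hlt p hpm; simp only [Bool.not_eq_true', beq_eq_false_iff_ne]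
              omega)
          rw [hfe] at hfil
          simpa [PySem.Dict.erase] using hfil
        rw [ih (PySem.Dict.erase d m) _ herase hrest]
        have hflat : pvFlat ((m, l) :: rest) = l ++ pvFlat rest := by simp [pvFlat]
        rw [hflat, List.take_append]
        simp only [Int.toNat_zero, List.drop_zero]
        have harith : (k - ((result ++ l.take ((k - (result.length : Int)).toNat)).length : Int)).toNat
            = (k - (result.length : Int)).toNat - l.length := by
          simp only [List.length_append, List.length_take]
          push_cast
          omega
        rw [harith, List.append_assoc]
    · rw [if_neg hk]
      have h0 : (k - result.length).toNat = 0 := by omega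
      simp [h0]

theorem pvBuild (sc : String → Int) :
    ∀ (hs : List String) (d : PySem.Dict Int (List String)) (bs : List (Int × List String)),
    d.items.Perm bs → pvDesc bs →
    (hs.foldl (fun d handle =>
        if ¬ PySem.Dict.contains d (sc handle) then PySem.Dict.insert d (sc handle) [handle]
        else PySem.Dict.modify d (sc handle) [] (fun l => l ++ [handle])) d).items.Perm
      (hs.foldl (fun bs handle => pvAddB bs (sc handle) handle) bs)
    ∧ pvDesc (hs.foldl (fun bs handle => pvAddB bs (sc handle) handle) bs) := by
  intro hs
  induction hs with
  | nil => intro d bs hp hd; exact ⟨hp, hd⟩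
  | cons h t ih =>
    intro d bs hp hd
    rw [List.foldl_cons, List.foldl_cons]
    exact ih _ _ (pvStep_perm d bs (sc h) h hp hd) (pvAddB_desc bs (sc h) h hd)

theorem pvSorted_eq (sc : String → Int) :
    ∀ (hs : List String) (bs : List (Int × List String)),
    pvDesc bs →
    (hs.map (fun h => (sc h, h))).foldl
        (fun acc x => PySem.List.insertBy (fun a b => decide ((-(a.1) : Int) < -(b.1))) x acc)
        (pvG bs)
      = pvG (hs.foldl (fun bs handle => pvAddB bs (sc handle) handle) bs) := by
  intro hs
  induction hs with
  | nil => intro bs hd; simp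
  | cons h t ih =>
    intro bs hd
    rw [List.map_cons, List.foldl_cons, pvInsertBy_G bs (sc h) h hd, List.foldl_cons]
    exact ih _ (pvAddB_desc bs (sc h) h hd)

theorem pvMapSnd_G (bs : List (Int × List String)) : (pvG bs).map Prod.snd = pvFlat bs := by
  simp [pvG, pvFlat, List.map_flatMap, List.map_map, Function.comp]

-- ===== VERDICT (by name: the statement is the Claim_ definition above) =====
theorem find_closest_handles_spec : Claim_equal_find_closest_handles := by
  intro uh ha k _
  unfold Spec_find_closest_handles
  by_cases hk : k > (ha.length : Int)
  · simp only [find_closest_handles, find_closest_handles_alt, if_pos hk]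
  · simp only [find_closest_handles, find_closest_handles_alt, if_neg hk]
    have hchars : PySem.Set.ofList uh.toList = uh.toList.foldl PySem.Set.add PySem.Set.empty := by
      rw [PySem.Set.ofList_eq_foldl]; rfl
    have hsc : (fun h => (pvScoreB (PySem.Set.ofList uh.toList) h, h))
        = (fun h => (pvScoreA (uh.toList.foldl PySem.Set.add PySem.Set.empty) h, h)) := by
      funext h
      rw [hchars, pvScore_eq]
    obtain ⟨hperm, hdesc⟩ := pvBuild (pvScoreA (uh.toList.foldl PySem.Set.add PySem.Set.empty)) ha
      PySem.Dict.empty [] (by simp [PySem.Dict.empty]) (by simp [pvDesc])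
    rw [pvLoopA_eq k _ _ [] hperm hdesc]
    rw [hsc, PySem.List.sorted_eq_foldl_insertBy]
    have hinit : ([] : List (Int × String)) = pvG [] := rfl
    rw [hinit, pvSorted_eq _ ha [] (by simp [pvDesc]), pvMapSnd_G,
      PySem.List.slice_to _ (by omega)]
    have htn : (max k 0).toNat = (k - (([] : List String).length : Int)).toNat := by
      simp; omega
    rw [htn]
    simp
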